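-- pv_equiv track=rewrite | github.com/supervisely/supervisely | supervisely/convert/image/csv/csv_helper.py | flat_tag_list
-- ===== SOURCE A (Python) =====
-- TAGS_DELIMITER = ","
--
-- def flat_tag_list(total_tags):
--     tags = []
--     for tag in total_tags:
--         if tag is None or tag == "":
--             continue
--         else:
--             if TAGS_DELIMITER in tag:
--                 tag = tag.split(TAGS_DELIMITER)
--             tags.append(tag)
--
--     total_tags = []
--     for sublist in tags:
--         if type(sublist) == str:
--             total_tags.append(sublist)
--         else:
--             for tag in sublist:
--                 if tag != "":
--                     total_tags.append(tag)
--
--     total_tags = list(set(total_tags))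
--     return total_tags
-- ===== SOURCE B (Python) =====
-- TAGS_DELIMITER = ","
--
-- def flat_tag_list(total_tags):
--     # Single pass: build the dedup set directly, no intermediate mixed buffer.
--     out = set()
--     for tag in total_tags:
--         if tag is None or tag == "":
--             continue
--         if TAGS_DELIMITER in tag:
--             for piece in tag.split(TAGS_DELIMITER):
--                 if piece != "":
--                     out.add(piece)
--         else:
--             out.add(tag)
--     return list(out)
-- ===== Notes on version B (the rewrite author's own statement) =====
-- stated objective: simpler
-- what changed: B replaces A's three phases (build a mixed str/list buffer, re-dispatch on type(...) == str to flatten it, then list(set(...))) with a single traversal that adds each tag or each non-empty split piece straight into one set.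
import Mathlib
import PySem

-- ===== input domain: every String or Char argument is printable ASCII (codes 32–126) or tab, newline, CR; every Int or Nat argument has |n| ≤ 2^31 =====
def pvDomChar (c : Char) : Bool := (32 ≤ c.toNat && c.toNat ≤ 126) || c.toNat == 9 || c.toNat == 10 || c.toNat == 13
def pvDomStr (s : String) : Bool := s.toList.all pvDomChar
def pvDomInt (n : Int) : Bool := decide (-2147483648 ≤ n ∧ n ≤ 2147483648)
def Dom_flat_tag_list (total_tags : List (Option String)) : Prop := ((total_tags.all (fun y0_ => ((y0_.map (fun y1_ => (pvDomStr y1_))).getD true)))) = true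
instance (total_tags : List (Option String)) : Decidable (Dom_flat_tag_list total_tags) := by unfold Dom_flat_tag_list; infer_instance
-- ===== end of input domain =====

-- B fuses A's three phases (mixed str/list buffer, type-dispatch flatten, list(set(...)))
-- into one traversal that builds the dedup set directly (objective: simpler).
-- The Python result is list(set(...)); list(set(...)) is modelled by PySem.Set (outputs compared as sets).

-- ===== PORT A =====
-- A's mixed str/list buffer `tags` is modelled as a list of Sum: inl = a plain tag, inr = a split list.
def flat_tag_list (total_tags : List (Option String)) : List String :=
  PySem.Set.ofList
    ((total_tags.foldl (fun acc tag =>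
        match tag with
        | none => acc
        | some t =>
          if t = "" then acc
          else if PySem.Str.isIn "," t then acc ++ [Sum.inr ((PySem.Str.split? t ",").getD [])]
          else acc ++ [Sum.inl t]) ([] : List (String ⊕ List String))).foldl
      (fun acc sublist =>
        match sublist with
        | Sum.inl s => acc ++ [s]
        | Sum.inr l => l.foldl (fun acc tag => if tag ≠ "" then acc ++ [tag] else acc) acc) [])

-- ===== PORT B =====
def flat_tag_list_alt (total_tags : List (Option String)) : List String :=
  total_tags.foldl (fun out tag =>
    match tag with
    | none => out
    | some t =>
      if t = "" then out
      else if PySem.Str.isIn "," t then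
        ((PySem.Str.split? t ",").getD []).foldl (fun out p => if p = "" then out else PySem.Set.add out p) out
      else PySem.Set.add out t) []

-- ===== PRECONDITION & SPEC =====
def Spec_flat_tag_list (total_tags : List (Option String)) (out : List String) : Prop := out = flat_tag_list_alt total_tags
instance (total_tags : List (Option String)) (out : List String) : Decidable (Spec_flat_tag_list total_tags out) := by unfold Spec_flat_tag_list; infer_instance

-- ===== CLAIM (what is proved, stated in full; the proofs are below) =====
def Claim_equal_flat_tag_list : Prop := ∀ (total_tags : List (Option String)), Dom_flat_tag_list total_tags → Spec_flat_tag_list total_tags (flat_tag_list total_tags)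

-- ===== LEMMAS AND PROOFS =====

-- the flattened contribution of one input tag (first occurrences of these, in order, form the set)
def pvContrib (tag : Option String) : List String :=
  match tag with
  | none => []
  | some t =>
    if t = "" then []
    else if PySem.Str.isIn "," t then ((PySem.Str.split? t ",").getD []).filter (fun p => p ≠ "")
    else [t]

theorem pv_filt_append (l : List String) (acc : List String) :
    l.foldl (fun acc tag => if tag ≠ "" then acc ++ [tag] else acc) acc
      = acc ++ l.filter (fun p => p ≠ "") := by
  induction l generalizing acc with
  | nil => simp
  | cons a l ih =>
    rw [List.foldl_cons]
    by_cases h : a = ""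
    · rw [if_neg (not_not_intro h), ih, List.filter_cons]
      simp [h]
    · rw [if_pos h, ih, List.filter_cons]
      simp [h]

theorem pv_phase1 (tt : List (Option String)) (acc : List (String ⊕ List String)) :
    tt.foldl (fun acc tag =>
      match tag with
      | none => acc
      | some t =>
        if t = "" then acc
        else if PySem.Str.isIn "," t then acc ++ [Sum.inr ((PySem.Str.split? t ",").getD [])]
        else acc ++ [Sum.inl t]) acc
    = acc ++ tt.flatMap (fun tag =>
        match tag with
        | none => []
        | some t =>
          if t = "" then []
          else if PySem.Str.isIn "," t then [Sum.inr ((PySem.Str.split? t ",").getD [])]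
          else [Sum.inl t]) := by
  induction tt generalizing acc with
  | nil => simp
  | cons a tt ih =>
    rw [List.foldl_cons, List.flatMap_cons]
    cases a with
    | none => rw [ih]; rfl
    | some t =>
      show List.foldl _
          (if t = "" then acc
           else if PySem.Str.isIn "," t then acc ++ [Sum.inr ((PySem.Str.split? t ",").getD [])]
           else acc ++ [Sum.inl t]) tt = _
      by_cases h : t = ""
      · rw [if_pos h, ih]
        show _ = acc ++ ((if t = "" then []
            else if PySem.Str.isIn "," t then [Sum.inr ((PySem.Str.split? t ",").getD [])]
            else [Sum.inl t]) ++ _)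
        rw [if_pos h]
        rfl
      · rw [if_neg h, ih]
        show _ = acc ++ ((if t = "" then []
            else if PySem.Str.isIn "," t then [Sum.inr ((PySem.Str.split? t ",").getD [])]
            else [Sum.inl t]) ++ _)
        rw [if_neg h]
        by_cases h2 : PySem.Str.isIn "," t
        · rw [if_pos h2, if_pos h2, List.append_assoc]
        · rw [if_neg h2, if_neg h2, List.append_assoc]

theorem pv_phase2 (tags : List (String ⊕ List String)) (acc : List String) :
    tags.foldl (fun acc sublist =>
      match sublist with
      | Sum.inl s => acc ++ [s]
      | Sum.inr l => l.foldl (fun acc tag => if tag ≠ "" then acc ++ [tag] else acc) acc) acc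
    = acc ++ tags.flatMap (fun sublist =>
        match sublist with
        | Sum.inl s => [s]
        | Sum.inr l => l.filter (fun p => p ≠ "")) := by
  induction tags generalizing acc with
  | nil => simp
  | cons a tags ih =>
    rw [List.foldl_cons, List.flatMap_cons]
    cases a with
    | inl s =>
      show List.foldl _ (acc ++ [s]) tags = _
      rw [ih, List.append_assoc]
    | inr l =>
      show List.foldl _ (l.foldl (fun acc tag => if tag ≠ "" then acc ++ [tag] else acc) acc) tags = _
      rw [pv_filt_append, ih, List.append_assoc]

theorem pv_flatMap_comp {α β γ : Type} (l : List α) (f : α → List β) (g : β → List γ) :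
    (l.flatMap f).flatMap g = l.flatMap (fun x => (f x).flatMap g) := by
  induction l with
  | nil => rfl
  | cons a l ih => simp [List.flatMap_cons, List.flatMap_append, ih]

theorem pv_A_eq (tt : List (Option String)) :
    flat_tag_list tt = PySem.Set.ofList (tt.flatMap pvContrib) := by
  unfold flat_tag_list
  rw [pv_phase1, pv_phase2, List.nil_append, List.nil_append, pv_flatMap_comp]
  apply congrArg
  apply congrArg (fun f => List.flatMap f tt)
  funext tag
  cases tag with
  | none => rfl
  | some t =>
    show (if t = "" then ([] : List (String ⊕ List String))
        else if PySem.Str.isIn "," t then [Sum.inr ((PySem.Str.split? t ",").getD [])]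
        else [Sum.inl t]).flatMap _ = pvContrib (some t)
    by_cases h : t = ""
    · have hc : pvContrib (some t) = [] := by
        show (if t = "" then []
            else if PySem.Str.isIn "," t then ((PySem.Str.split? t ",").getD []).filter (fun p => p ≠ "")
            else [t]) = []
        rw [if_pos h]
      rw [if_pos h, hc]
      rfl
    · rw [if_neg h]
      by_cases h2 : PySem.Str.isIn "," t
      · have hc : pvContrib (some t) = ((PySem.Str.split? t ",").getD []).filter (fun p => p ≠ "") := by
          show (if t = "" then []
              else if PySem.Str.isIn "," t then ((PySem.Str.split? t ",").getD []).filter (fun p => p ≠ "")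
              else [t]) = _
          rw [if_neg h, if_pos h2]
        rw [if_pos h2, hc]
        simp
      · have hc : pvContrib (some t) = [t] := by
          show (if t = "" then []
              else if PySem.Str.isIn "," t then ((PySem.Str.split? t ",").getD []).filter (fun p => p ≠ "")
              else [t]) = _
          rw [if_neg h, if_neg h2]
        rw [if_neg h2, hc]
        simp

theorem pv_add_filt (l : List String) (s : PySem.Set String) :
    l.foldl (fun out p => if p = "" then out else PySem.Set.add out p) s
      = (l.filter (fun p => p ≠ "")).foldl PySem.Set.add s := by
  induction l generalizing s with
  | nil => rfl
  | cons a l ih =>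
    rw [List.foldl_cons, List.filter_cons]
    by_cases h : a = ""
    · rw [if_pos h, ih]
      simp [h]
    · rw [if_neg h, ih]
      simp [h]

theorem pv_B_eq (tt : List (Option String)) (s : PySem.Set String) :
    tt.foldl (fun out tag =>
      match tag with
      | none => out
      | some t =>
        if t = "" then out
        else if PySem.Str.isIn "," t then
          ((PySem.Str.split? t ",").getD []).foldl (fun out p => if p = "" then out else PySem.Set.add out p) out
        else PySem.Set.add out t) s
    = (tt.flatMap pvContrib).foldl PySem.Set.add s := by
  induction tt generalizing s with
  | nil => rfl
  | cons a tt ih =>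
    rw [List.foldl_cons, List.flatMap_cons, List.foldl_append]
    cases a with
    | none => rw [ih]; rfl
    | some t =>
      show List.foldl _
          (if t = "" then s
           else if PySem.Str.isIn "," t then
             ((PySem.Str.split? t ",").getD []).foldl (fun out p => if p = "" then out else PySem.Set.add out p) s
           else PySem.Set.add s t) tt = _
      by_cases h : t = ""
      · have hc : pvContrib (some t) = [] := by
          show (if t = "" then []
              else if PySem.Str.isIn "," t then ((PySem.Str.split? t ",").getD []).filter (fun p => p ≠ "")
              else [t]) = []
          rw [if_pos h]
        rw [if_pos h, ih, hc]
        rfl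
      · rw [if_neg h]
        by_cases h2 : PySem.Str.isIn "," t
        · have hc : pvContrib (some t) = ((PySem.Str.split? t ",").getD []).filter (fun p => p ≠ "") := by
            show (if t = "" then []
                else if PySem.Str.isIn "," t then ((PySem.Str.split? t ",").getD []).filter (fun p => p ≠ "")
                else [t]) = _
            rw [if_neg h, if_pos h2]
          rw [if_pos h2, pv_add_filt, ih, hc]
        · have hc : pvContrib (some t) = [t] := by
            show (if t = "" then []
                else if PySem.Str.isIn "," t then ((PySem.Str.split? t ",").getD []).filter (fun p => p ≠ "")
                else [t]) = _
            rw [if_neg h, if_neg h2]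
          rw [if_neg h2, ih, hc]
          rfl

-- ===== VERDICT (by name: the statement is the Claim_ definition above) =====
theorem flat_tag_list_spec : Claim_equal_flat_tag_list := by
  intro tt _
  unfold Spec_flat_tag_list flat_tag_list_alt
  rw [pv_B_eq, pv_A_eq, PySem.Set.ofList_eq_foldl]
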